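-- pv_equiv track=rewrite | github.com/Biomolecular-Design-Nexus/cyclicboltz1_mcp | scripts/lib/utils.py | generate_chain_ids
-- ===== SOURCE A (Python) =====
-- from typing import List, Dict, Any, Union
--
-- def generate_chain_ids(num_chains: int) -> List[str]:
--     """
--     Generate chain IDs (A, B, C, ...) for the given number of chains.
--
--     Args:
--         num_chains: Number of chain IDs to generate
--
--     Returns:
--         List of chain IDs
--
--     Example:
--         >>> generate_chain_ids(3)
--         ['A', 'B', 'C']
--         >>> generate_chain_ids(26)
--         ['A', 'B', ..., 'Z']
--     """
--     if num_chains <= 0: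
--         return []
--
--     if num_chains > 26:
--         # For more than 26 chains, use A1, A2, etc.
--         chains = []
--         for i in range(num_chains):
--             base = chr(ord('A') + (i % 26))
--             suffix = "" if i < 26 else str((i // 26))
--             chains.append(f"{base}{suffix}")
--         return chains
--     else:
--         return [chr(ord('A') + i) for i in range(num_chains)]
-- ===== SOURCE B (Python) =====
-- def generate_chain_ids(num_chains):
--     result = []
--     g = 0
--     while len(result) < num_chains:
--         suffix = "" if g == 0 else str(g)
--         for r in range(26):
--             if len(result) == num_chains:
--                 break
--             result.append(chr(ord('A') + r) + suffix)
--         g += 1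
--     return result
-- ===== Notes on version B (the rewrite author's own statement) =====
-- stated objective: alternative
-- what changed: Replaced A's two-branch flat pass over range(num_chains) with modulo/floor-division arithmetic by a nested traversal: an outer while-loop over successive suffix groups and an inner loop over the alphabet letters, breaking once enough labels are built.
import Mathlib
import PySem

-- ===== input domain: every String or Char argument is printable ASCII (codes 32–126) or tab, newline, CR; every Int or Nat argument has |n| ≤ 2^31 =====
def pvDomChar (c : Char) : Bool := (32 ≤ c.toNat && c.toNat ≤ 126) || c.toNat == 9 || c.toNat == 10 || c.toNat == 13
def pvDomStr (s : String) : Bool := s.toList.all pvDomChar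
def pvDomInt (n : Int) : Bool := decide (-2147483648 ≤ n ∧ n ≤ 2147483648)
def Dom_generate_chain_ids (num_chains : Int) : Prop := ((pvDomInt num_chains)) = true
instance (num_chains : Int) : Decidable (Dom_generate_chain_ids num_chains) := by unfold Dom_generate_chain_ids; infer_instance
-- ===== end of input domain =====

-- B replaces A's flat range(num_chains) pass with i%26 / i//26 arithmetic by a nested
-- group-then-letter loop that stops when enough labels are built (objective: alternative).

-- ===== PORT A =====
-- A: flat loop over range(num_chains); letter = chr(ord('A') + i % 26), suffix "" for i < 26 else str(i // 26).
def generate_chain_ids (num_chains : Int) : List String :=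
  if num_chains ≤ 0 then []
  else if num_chains > 26 then
    (PySem.List.pyRange 0 num_chains 1).foldl
      (fun chains i =>
        chains ++ [String.singleton (Char.ofNat (65 + PySem.Int.mod i 26).toNat) ++
          (if i < 26 then "" else PySem.Int.toStr (PySem.Int.floordiv i 26))]) []
  else
    (PySem.List.pyRange 0 num_chains 1).map (fun i => String.singleton (Char.ofNat (65 + i).toNat))

-- ===== PORT B =====
-- inner 'for r in range(26)' with early break once enough labels exist (rem = labels still needed)
def pvAltInner (suffix : String) : List Nat → Nat → List String
  | [], _ => []
  | _ :: _, 0 => []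
  | r :: rs, rem + 1 =>
      (String.singleton (Char.ofNat (65 + r)) ++ suffix) :: pvAltInner suffix rs rem

-- outer 'while len(result) < num_chains' over suffix groups g = 0, 1, 2, …
def pvAltOuter (g : Int) (rem : Nat) : List String :=
  if _h : rem = 0 then []
  else
    let suffix := if g = 0 then "" else PySem.Int.toStr g
    pvAltInner suffix (List.range 26) rem ++ pvAltOuter (g + 1) (rem - min 26 rem)
  termination_by rem
  decreasing_by omega

def generate_chain_ids_alt (num_chains : Int) : List String :=
  pvAltOuter 0 num_chains.toNat

-- ===== PRECONDITION & SPEC =====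
def Spec_generate_chain_ids (num_chains : Int) (out : List String) : Prop := out = generate_chain_ids_alt num_chains
instance (num_chains : Int) (out : List String) : Decidable (Spec_generate_chain_ids num_chains out) := by unfold Spec_generate_chain_ids; infer_instance

-- ===== CLAIM (what is proved, stated in full; the proofs are below) =====
def Claim_equal_generate_chain_ids : Prop := ∀ (num_chains : Int), Dom_generate_chain_ids num_chains → Spec_generate_chain_ids num_chains (generate_chain_ids num_chains)

-- ===== LEMMAS AND PROOFS =====

-- the label of the j-th chain overall, when the outer loop started at group g
def pvF (g : Int) (j : Nat) : String :=
  String.singleton (Char.ofNat (65 + j % 26)) ++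
    (if g + ((j / 26 : Nat) : Int) = 0 then "" else PySem.Int.toStr (g + ((j / 26 : Nat) : Int)))

theorem pvAltInner_eq_map (suffix : String) (rs : List Nat) (rem : Nat) :
    pvAltInner suffix rs rem =
      (rs.take rem).map (fun r => String.singleton (Char.ofNat (65 + r)) ++ suffix) := by
  induction rs generalizing rem with
  | nil => cases rem <;> rfl
  | cons r rs ih => cases rem with
    | zero => rfl
    | succ m => simp [pvAltInner, ih]

theorem pvAltOuter_eq_map (rem : Nat) (g : Int) (hg : 0 ≤ g) :
    pvAltOuter g rem = (List.range rem).map (pvF g) := by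
  induction rem using Nat.strong_induction_on generalizing g with
  | _ rem ih =>
    by_cases h : rem = 0
    · subst h; simp [pvAltOuter]
    · rw [pvAltOuter]
      simp only [h, dite_false]
      have hk : min 26 rem ≤ rem := Nat.min_le_right _ _
      have ih' := ih (rem - min 26 rem) (by omega) (g + 1) (by omega)
      rw [pvAltInner_eq_map, ih', List.take_range, Nat.min_comm rem 26]
      have hsplit : rem = min 26 rem + (rem - min 26 rem) := by omega
      conv_rhs => rw [hsplit, List.range_add]
      rw [List.map_append, List.map_map]
      simp only [Function.comp_def]
      congr 1
      · -- first group: letters 0 .. min 26 rem - 1, suffix for group g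
        apply List.map_congr_left
        intro r hr
        have hr26 : r < 26 := by
          have := List.mem_range.mp hr; omega
        have h1 : r % 26 = r := Nat.mod_eq_of_lt hr26
        have h2 : r / 26 = 0 := Nat.div_eq_of_lt hr26
        simp [pvF, h1, h2]
      · -- later groups: shifting the index by 26 = moving to the next group
        apply List.map_congr_left
        intro j _
        have hmin : min 26 rem = 26 := by
          by_cases h26 : 26 ≤ rem
          · omega
          · exfalso
            have : rem - min 26 rem = 0 := by omega
            rw [this] at *
            simp at *
            omega
        rw [hmin]
        simp only [pvF]
        have hmod : (26 + j) % 26 = j % 26 := by omega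
        have hdiv : (26 + j) / 26 = 1 + j / 26 := by omega
        rw [hmod, hdiv]
        have hc : g + ((1 + j / 26 : Nat) : Int) = g + 1 + ((j / 26 : Nat) : Int) := by
          push_cast; ring
        rw [hc]

-- A's big-branch label equals pvF 0 on a natural index
theorem pvA_label_eq (j : Nat) :
    String.singleton (Char.ofNat (65 + PySem.Int.mod (j : Int) 26).toNat) ++
      (if (j : Int) < 26 then "" else PySem.Int.toStr (PySem.Int.floordiv (j : Int) 26)) =
    pvF 0 j := by
  have hmod : PySem.Int.mod (j : Int) 26 = ((j % 26 : Nat) : Int) := by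
    exact_mod_cast PySem.Int.mod_natCast j 26
  have hdiv : PySem.Int.floordiv (j : Int) 26 = ((j / 26 : Nat) : Int) := by
    exact_mod_cast PySem.Int.floordiv_natCast j 26
  have ht : ((65 : Int) + ((j % 26 : Nat) : Int)).toNat = 65 + j % 26 := by omega
  have hiff : ((j : Int) < 26) ↔ (((j / 26 : Nat) : Int) = 0) := by omega
  rw [hmod, hdiv, ht]
  simp only [pvF, zero_add]
  by_cases hj : (j : Int) < 26
  · rw [if_pos hj, if_pos (hiff.mp hj)]
  · rw [if_neg hj, if_neg (fun h => hj (hiff.mpr h))]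

-- ===== VERDICT (by name: the statement is the Claim_ definition above) =====
theorem generate_chain_ids_spec : Claim_equal_generate_chain_ids := by
  intro n _
  unfold Spec_generate_chain_ids generate_chain_ids generate_chain_ids_alt
  rw [pvAltOuter_eq_map _ 0 (le_refl 0)]
  by_cases h0 : n ≤ 0
  · have : n.toNat = 0 := by omega
    simp [h0, this]
  · rw [if_neg h0]
    rw [PySem.List.pyRange_one]
    have hlen : (n - 0).toNat = n.toNat := by omega
    rw [hlen]
    by_cases h26 : n > 26
    · rw [if_pos h26]
      rw [PySem.List.foldl_append_singleton_eq_map, List.map_map]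
      simp only [List.nil_append]
      apply List.map_congr_left
      intro j _
      simpa using pvA_label_eq j
    · rw [if_neg h26, List.map_map]
      apply List.map_congr_left
      intro j hj
      have hj26 : j < 26 := by
        have := List.mem_range.mp hj; omega
      have h1 : j % 26 = j := Nat.mod_eq_of_lt hj26
      have h2 : j / 26 = 0 := Nat.div_eq_of_lt hj26
      have ht : ((65 : Int) + (j : Int)).toNat = 65 + j := by omega
      simp [pvF, h1, h2, ht]
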